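-- pv_equiv track=rewrite | github.com/MundVetter/hack | ai-builder/modal_app/dataset_sumarizer.py | _select_split_for_example
-- ===== SOURCE A (Python) =====
-- from typing import Any, Dict, List, Optional
--
-- def _select_split_for_example(splits: Dict[str, Dict[str, Optional[int]]]) -> str:
--     if not splits:
--         return "train"
--     # prefer the largest if counts exist; otherwise use common preference order
--     with_counts = [(n, info.get("num_examples")) for n, info in splits.items() if info.get("num_examples") is not None]
--     if with_counts:
--         with_counts.sort(key=lambda x: x[1] or 0, reverse=True)
--         return with_counts[0][0]
--     for preferred in ("train", "validation", "val", "dev", "test"):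
--         if preferred in splits:
--             return preferred
--     # else just the first
--     return next(iter(splits.keys()))
-- ===== SOURCE B (Python) =====
-- def _select_split_for_example(splits):
--     if not splits:
--         return "train"
--     # single linear pass: first split with the strictly largest known count wins
--     best = None  # (name, count)
--     for name, info in splits.items():
--         c = info.get("num_examples")
--         if c is None:
--             continue
--         if best is None or c > best[1]:
--             best = (name, c)
--     if best is not None:
--         return best[0]
--     for preferred in ("train", "validation", "val", "dev", "test"):
--         if preferred in splits:
--             return preferred
--     return next(iter(splits.keys()))
-- ===== Notes on version B (the rewrite author's own statement) =====
-- stated objective: simpler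
-- what changed: Replaces build-list-then-stable-reverse-sort with a single linear pass keeping the first split whose num_examples is strictly greater than the best seen, which matches the head of the stable descending sort.
import Mathlib
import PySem

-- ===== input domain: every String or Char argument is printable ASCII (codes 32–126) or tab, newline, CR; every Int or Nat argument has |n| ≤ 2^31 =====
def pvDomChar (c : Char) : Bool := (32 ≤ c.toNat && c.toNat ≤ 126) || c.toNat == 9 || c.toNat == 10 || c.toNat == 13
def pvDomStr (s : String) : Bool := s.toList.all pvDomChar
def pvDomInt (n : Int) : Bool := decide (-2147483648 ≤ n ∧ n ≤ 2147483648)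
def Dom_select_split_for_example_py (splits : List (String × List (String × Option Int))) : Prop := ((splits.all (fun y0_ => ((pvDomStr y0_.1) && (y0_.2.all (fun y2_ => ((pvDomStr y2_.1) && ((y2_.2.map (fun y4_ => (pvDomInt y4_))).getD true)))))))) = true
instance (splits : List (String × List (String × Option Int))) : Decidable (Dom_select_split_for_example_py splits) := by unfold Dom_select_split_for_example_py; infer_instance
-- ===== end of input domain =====

-- B replaces A's build-list-then-stable-reverse-sort by one linear pass keeping the first
-- split with a strictly larger known count (objective: simpler).

-- ===== PORT A =====
-- info.get("num_examples"): first match in the inner dict, flattened (key absent or value None both give none)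
def pvNumExamples (info : List (String × Option Int)) : Option Int :=
  ((PySem.Dict.mk info).get? "num_examples").join

-- the shared preference-order fallback ('for preferred in (...): if preferred in splits: return preferred' then first key)
def pvPreferenceFallback (splits : List (String × List (String × Option Int))) : String :=
  if splits.any (fun p => p.1 == "train") then "train"
  else if splits.any (fun p => p.1 == "validation") then "validation"
  else if splits.any (fun p => p.1 == "val") then "val"
  else if splits.any (fun p => p.1 == "dev") then "dev"
  else if splits.any (fun p => p.1 == "test") then "test"
  else (splits.headD ("", [])).1

def select_split_for_example_py (splits : List (String × List (String × Option Int))) : String :=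
  if splits = [] then "train"
  else
    let with_counts : List (String × Option Int) :=
      splits.filterMap (fun p =>
        match pvNumExamples p.2 with
        | some c => some (p.1, some c)
        | none => none)
    if with_counts ≠ [] then
      -- key = x[1] or 0 (x[1] is truthy unless it is the int 0)
      ((PySem.List.sorted with_counts
          (fun x => match x.2 with | some c => if c = 0 then (0 : Int) else c | none => 0)
          true).headD ("", none)).1
    else pvPreferenceFallback splits

-- ===== PORT B =====
def select_split_for_example_py_alt (splits : List (String × List (String × Option Int))) : String :=
  if splits = [] then "train"
  else
    let best : Option (String × Int) :=
      splits.foldl (fun acc p =>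
        match pvNumExamples p.2 with
        | none => acc
        | some c =>
          match acc with
          | none => some (p.1, c)
          | some b => if b.2 < c then some (p.1, c) else some b) none
    match best with
    | some b => b.1
    | none => pvPreferenceFallback splits

-- ===== PRECONDITION & SPEC =====
def Spec_select_split_for_example_py (splits : List (String × List (String × Option Int))) (out : String) : Prop := out = select_split_for_example_py_alt splits
instance (splits : List (String × List (String × Option Int))) (out : String) : Decidable (Spec_select_split_for_example_py splits out) := by unfold Spec_select_split_for_example_py; infer_instance

-- ===== CLAIM (what is proved, stated in full; the proofs are below) =====
def Claim_equal_select_split_for_example_py : Prop := ∀ (splits : List (String × List (String × Option Int))), Dom_select_split_for_example_py splits → Spec_select_split_for_example_py splits (select_split_for_example_py splits)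

-- ===== LEMMAS AND PROOFS =====

-- head of Python's stable reverse sort = Python's max (the FIRST element with maximal key)
theorem head?_sorted_rev_eq_max? {α κ : Type} [LinearOrder κ] (xs : List α) (key : α → κ) :
    (PySem.List.sorted xs key true).head? = PySem.List.max? xs key := by
  induction xs using List.reverseRecOn with
  | nil => rfl
  | append_singleton l x ih =>
    have hs : PySem.List.sorted (l ++ [x]) key true
        = PySem.List.insertBy (fun a b => decide (key b < key a)) x (PySem.List.sorted l key true) := by
      simp [PySem.List.sorted, List.foldl_append]
    have hm : PySem.List.max? (l ++ [x]) key
        = match PySem.List.max? l key with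
          | none => some x
          | some m => if key m < key x then some x else some m := by
      simp only [PySem.List.max?, List.foldl_append, List.foldl]
      rfl
    rw [hs, hm, ← ih]
    rcases h : PySem.List.sorted l key true with _ | ⟨m, t⟩
    · simp [PySem.List.insertBy]
    · simp only [PySem.List.insertBy, List.head?_cons]
      by_cases hx : key m < key x <;> simp [hx]

-- max? over a mapped list
theorem max?_map {α β κ : Type} [LinearOrder κ] (g : α → β) (k : β → κ) (l : List α) :
    PySem.List.max? (l.map g) k = Option.map g (PySem.List.max? l (fun a => k (g a))) := by
  simp only [PySem.List.max?, List.foldl_map]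
  suffices h : ∀ (acc : Option α),
      l.foldl (fun acc x => match acc with
        | none => some (g x)
        | some m => if k m < k (g x) then some (g x) else some m) (acc.map g)
      = Option.map g (l.foldl (fun acc x => match acc with
        | none => some x
        | some m => if k (g m) < k (g x) then some x else some m) acc) from h none
  intro acc
  induction l generalizing acc with
  | nil => rfl
  | cons x t ih =>
    rcases acc with _ | m
    · simpa using ih (some x)
    · simp only [List.foldl, Option.map_some]
      by_cases hc : k (g m) < k (g x)
      · simpa [hc] using ih (some x)
      · simpa [hc] using ih (some m)

theorem select_split_for_example_py_spec' :
    ∀ splits, select_split_for_example_py splits = select_split_for_example_py_alt splits := by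
  intro splits
  unfold select_split_for_example_py select_split_for_example_py_alt
  by_cases hnil : splits = []
  · simp [hnil]
  · simp only [if_neg hnil]
    -- B's fold over splits = max? over the filtered (name, count) list
    set fB : (String × List (String × Option Int)) → Option (String × Int) :=
      fun p => (pvNumExamples p.2).map (fun c => (p.1, c)) with hfB
    have hfold :
        splits.foldl (fun acc p =>
          match pvNumExamples p.2 with
          | none => acc
          | some c =>
            match acc with
            | none => some (p.1, c)
            | some b => if b.2 < c then some (p.1, c) else some b) none
        = PySem.List.max? (splits.filterMap fB) (fun x => x.2) := by
      rw [PySem.List.max?, List.foldl_filterMap]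
      apply PySem.List.foldl_congr_mem
      intro acc p _
      rcases hj : pvNumExamples p.2 with _ | c <;>
        simp only [hfB, hj, Option.map_none, Option.map_some]
      all_goals cases acc <;> rfl
    -- A's with_counts is the image of the filtered list under (n, c) ↦ (n, some c)
    have hwc :
        splits.filterMap (fun p =>
          match pvNumExamples p.2 with
          | some c => some (p.1, some c)
          | none => none)
        = (splits.filterMap fB).map (fun q => (q.1, some q.2)) := by
      rw [List.map_filterMap]
      apply List.filterMap_congr
      intro p _
      rcases hj : pvNumExamples p.2 with _ | c <;> simp [hfB, hj]
    rw [hfold, hwc]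
    -- A's key simplifies to (·.2).getD 0, which on the mapped list is just the count
    have hkey : (fun x : String × Option Int =>
        match x.2 with | some c => if c = 0 then (0 : Int) else c | none => 0)
        = fun x => x.2.getD 0 := by
      funext x
      rcases x.2 with _ | c
      · rfl
      · simp only [Option.getD_some]
        split <;> omega
    rw [hkey]
    rcases hm : PySem.List.max? (splits.filterMap fB) (fun x => x.2) with _ | b
    · have : splits.filterMap fB = [] := (PySem.List.max?_eq_none_iff _ _).mp hm
      simp [this]
    · have hne : splits.filterMap fB ≠ [] :=
        List.ne_nil_of_mem (PySem.List.max?_mem hm)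
      have hne' : (splits.filterMap fB).map (fun q => (q.1, some q.2)) ≠ [] := by
        simp [hne]
      rw [if_pos hne']
      have := head?_sorted_rev_eq_max?
        ((splits.filterMap fB).map (fun q => (q.1, some q.2)))
        (fun x : String × Option Int => x.2.getD 0)
      rw [max?_map (fun q : String × Int => (q.1, some q.2)) (fun x => x.2.getD 0)] at this
      simp only [Option.getD_some] at this
      rw [hm] at this
      rcases hs : PySem.List.sorted ((splits.filterMap fB).map (fun q => (q.1, some q.2)))
        (fun x => x.2.getD 0) true with _ | ⟨e, t⟩
      · rw [hs] at this; exact absurd this (by simp)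
      · rw [hs] at this
        simp only [List.head?_cons, Option.map_some, Option.some.injEq] at this
        simp [hs, this]

-- ===== VERDICT (by name: the statement is the Claim_ definition above) =====
theorem select_split_for_example_py_spec : Claim_equal_select_split_for_example_py := by
  intro splits _
  exact select_split_for_example_py_spec' splits
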